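-- pv_equiv track=rewrite | github.com/z11i/adventofcode-py | 2023/day11.py | find_empty_spaces
-- ===== SOURCE A (Python) =====
-- from typing import List, Tuple
--
-- def find_empty_spaces(matrix: List[List[str]]) -> Tuple[List[int], List[int]]:
--     empty_rows_prefix_sum = [0] * (len(matrix) + 1)
--     empty_cols_prefix_sum = [0] * (len(matrix[0]) + 1)
--
--     for r in range(len(matrix)):
--         if all(x == "." for x in matrix[r]):
--             empty_rows_prefix_sum[r + 1] = empty_rows_prefix_sum[r] + 1
--         else:
--             empty_rows_prefix_sum[r + 1] = empty_rows_prefix_sum[r]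
--     for c in range(len(matrix[0])):
--         if all(x == "." for x in [matrix[i][c] for i in range(len(matrix))]):
--             empty_cols_prefix_sum[c + 1] = empty_cols_prefix_sum[c] + 1
--         else:
--             empty_cols_prefix_sum[c + 1] = empty_cols_prefix_sum[c]
--     return (empty_rows_prefix_sum[1:], empty_cols_prefix_sum[1:])
-- ===== SOURCE B (Python) =====
-- from typing import List, Tuple
--
-- def _counts_upto(sorted_idx, n):
--     # out[i] = how many entries of sorted_idx are <= i, by a single merge walk
--     j = 0
--     out = []
--     for i in range(n):
--         if j < len(sorted_idx) and sorted_idx[j] == i: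
--             j += 1
--         out.append(j)
--     return out
--
-- def find_empty_spaces(matrix: List[List[str]]) -> Tuple[List[int], List[int]]:
--     n_cols = len(matrix[0])
--     empty_rows = [r for r in range(len(matrix)) if all(x == "." for x in matrix[r])]
--     empty_cols = list(range(n_cols))
--     for row in matrix:
--         empty_cols = [c for c in empty_cols if row[c] == "."]
--     return (_counts_upto(empty_rows, len(matrix)), _counts_upto(empty_cols, n_cols))
-- ===== Notes on version B (the rewrite author's own statement) =====
-- stated objective: alternative
-- what changed: B drops A's dense preallocated prefix-sum buffers entirely: it builds sparse sorted index lists (empty rows collected by scanning rows; empty columns obtained by sieving a shrinking candidate-column list through each row instead of materialising and rescanning every column), then converts each sparse list into the running counts with a single merge-walk pointer.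
import Mathlib
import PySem

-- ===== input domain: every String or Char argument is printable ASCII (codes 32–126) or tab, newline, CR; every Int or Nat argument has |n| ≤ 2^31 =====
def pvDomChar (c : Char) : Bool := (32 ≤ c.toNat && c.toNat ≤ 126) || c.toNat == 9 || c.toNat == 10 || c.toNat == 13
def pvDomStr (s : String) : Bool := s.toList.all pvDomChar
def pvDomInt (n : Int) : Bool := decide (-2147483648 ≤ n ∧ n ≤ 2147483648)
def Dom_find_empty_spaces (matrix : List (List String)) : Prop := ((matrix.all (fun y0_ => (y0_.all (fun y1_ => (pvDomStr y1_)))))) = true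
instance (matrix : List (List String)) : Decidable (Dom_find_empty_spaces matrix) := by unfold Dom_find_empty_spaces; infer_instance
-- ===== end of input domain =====

-- B replaces A's dense in-place prefix-sum buffers by a sparse scheme: sorted index lists of
-- empty rows / empty columns (columns sieved through the rows), converted to running counts by
-- a single merge-walk pointer (objective: alternative); return values agree on Pre_.

-- ===== PORT A =====
def find_empty_spaces (matrix : List (List String)) : List Int × List Int :=
  let rows0 : List Int := List.replicate (matrix.length + 1) 0
  let cols0 : List Int := List.replicate ((PySem.List.pyGetD matrix (0:Int) []).length + 1) 0
  let rows := (PySem.List.pyRange 0 (matrix.length : Int) 1).foldl (fun ps r =>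
      if (PySem.List.pyGetD matrix r []).all (fun x => x == ".") then
        PySem.List.pySetD ps (r+1) (PySem.List.pyGetD ps r 0 + 1)
      else
        PySem.List.pySetD ps (r+1) (PySem.List.pyGetD ps r 0)) rows0
  let cols := (PySem.List.pyRange 0 (((PySem.List.pyGetD matrix (0:Int) []).length : Int)) 1).foldl (fun ps c =>
      if (((PySem.List.pyRange 0 (matrix.length : Int) 1).map
            (fun i => PySem.List.pyGetD (PySem.List.pyGetD matrix i []) c "")).all (fun x => x == ".")) then
        PySem.List.pySetD ps (c+1) (PySem.List.pyGetD ps c 0 + 1)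
      else
        PySem.List.pySetD ps (c+1) (PySem.List.pyGetD ps c 0)) cols0
  (PySem.List.slice rows (some 1) none, PySem.List.slice cols (some 1) none)

-- ===== PORT B =====
-- port of Source B's _counts_upto: one merge walk of the sorted index list against 0..n-1
def countsUpto (sortedIdx : List Int) (n : Nat) : List Int :=
  ((List.range n).foldl (fun (st : Nat × List Int) (i : Nat) =>
      let j := if st.1 < sortedIdx.length && sortedIdx.getD st.1 0 == (i : Int) then st.1 + 1 else st.1
      (j, st.2 ++ [(j : Int)])) ((0 : Nat), ([] : List Int))).2

def find_empty_spaces_alt (matrix : List (List String)) : List Int × List Int :=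
  let nCols := (PySem.List.pyGetD matrix (0:Int) []).length
  let emptyRows : List Int := (PySem.List.pyRange 0 (matrix.length : Int) 1).filter
      (fun r => (PySem.List.pyGetD matrix r []).all (fun x => x == "."))
  let emptyCols : List Int := matrix.foldl
      (fun cand row => cand.filter (fun c => PySem.List.pyGetD row c "" == "."))
      (PySem.List.pyRange 0 (nCols : Int) 1)
  (countsUpto emptyRows matrix.length, countsUpto emptyCols nCols)

-- ===== PRECONDITION & SPEC =====
-- Pre_ excludes exactly the inputs on which Python A raises IndexError: the empty matrix
-- (matrix[0]) and matrices with a row shorter than the first row (matrix[i][c]).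
def Pre_find_empty_spaces (matrix : List (List String)) : Prop :=
  matrix ≠ [] ∧ ∀ row ∈ matrix, (matrix.headD []).length ≤ row.length
instance (matrix : List (List String)) : Decidable (Pre_find_empty_spaces matrix) := by unfold Pre_find_empty_spaces; infer_instance
def pvWitness_find_empty_spaces : List (List String) := [[".", "#"], [".", "."]]

def Spec_find_empty_spaces (matrix : List (List String)) (out : List Int × List Int) : Prop := out = find_empty_spaces_alt matrix
instance (matrix : List (List String)) (out : List Int × List Int) : Decidable (Spec_find_empty_spaces matrix out) := by unfold Spec_find_empty_spaces; infer_instance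

-- ===== CLAIM (what is proved, stated in full; the proofs are below) =====
def Claim_equal_find_empty_spaces : Prop := ∀ (matrix : List (List String)), Dom_find_empty_spaces matrix → Pre_find_empty_spaces matrix → Spec_find_empty_spaces matrix (find_empty_spaces matrix)

-- ===== LEMMAS AND PROOFS =====

-- canonical value both sides are reduced to: out[i] = #{k ≤ i | f k}
def canon (f : Nat → Bool) (n : Nat) : List Int :=
  (List.range n).map (fun i => (((List.range (i+1)).countP f : Nat) : Int))

-- proof-side normal form of A's write-into-a-zero-buffer loop
def runningTotals (total : Int) : List Int → List Int
  | [] => []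
  | x :: xs => (total + x) :: runningTotals (total + x) xs

theorem runningTotals_length (a : Int) (l : List Int) : (runningTotals a l).length = l.length := by
  induction l generalizing a with
  | nil => rfl
  | cons x xs ih => simp [runningTotals, ih]

theorem runningTotals_append_singleton (a x : Int) (l : List Int) :
    runningTotals a (l ++ [x]) = runningTotals a l ++ [a + l.sum + x] := by
  induction l generalizing a with
  | nil => simp [runningTotals]
  | cons y ys ih => simp [runningTotals, ih]; ring_nf

theorem getD_cons_runningTotals (a : Int) (l : List Int) :
    (a :: runningTotals a l).getD l.length 0 = a + l.sum := by
  induction l generalizing a with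
  | nil => simp
  | cons y ys ih => simpa [runningTotals, add_assoc] using ih (a + y)

-- invariant of A's write-into-a-zero-buffer loop, in normalised form
theorem loop_inv (f : Nat → Int) (n : Nat) : ∀ k, k ≤ n →
    (List.range k).foldl (fun ps r => ps.set (r+1) (ps.getD r 0 + f r)) (List.replicate (n+1) (0:Int))
      = 0 :: runningTotals 0 ((List.range k).map f) ++ List.replicate (n-k) 0 := by
  intro k
  induction k with
  | zero => intro _; simp [runningTotals, List.replicate_succ]
  | succ k ih =>
    intro hk
    have hkn : k < n := hk
    rw [List.range_succ, List.foldl_append, ih (le_of_lt hkn)]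
    have hlen : (runningTotals 0 ((List.range k).map f)).length = k := by
      rw [runningTotals_length, List.length_map, List.length_range]
    have hget : ((0 :: runningTotals 0 ((List.range k).map f)) ++ List.replicate (n-k) 0).getD k 0
        = ((List.range k).map f).sum := by
      rw [List.getD_append _ _ _ k (by simp [hlen])]
      have := getD_cons_runningTotals 0 ((List.range k).map f)
      rw [List.length_map, List.length_range] at this
      simpa using this
    have hrep : List.replicate (n-k) (0:Int) = 0 :: List.replicate (n-(k+1)) 0 := by
      have : n - k = (n - (k+1)) + 1 := by omega
      rw [this, List.replicate_succ]
    simp only [List.foldl_cons, List.foldl_nil, List.cons_append] at *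
    rw [hget]
    rw [hrep, List.set_cons_succ, List.set_append, hlen, if_neg (lt_irrefl k), Nat.sub_self,
      List.set_cons_zero, List.map_append]
    simp [runningTotals_append_singleton]

theorem loop_drop (f : Nat → Int) (n : Nat) :
    (((List.range n).foldl (fun ps r => ps.set (r+1) (ps.getD r 0 + f r)) (List.replicate (n+1) (0:Int))).drop 1)
      = runningTotals 0 ((List.range n).map f) := by
  rw [loop_inv f n n le_rfl]
  simp

-- running totals of a 0/1 indicator ARE the running counts
theorem runningTotals_canon (g : Nat → Bool) (n : Nat) :
    runningTotals 0 ((List.range n).map (fun i => if g i then (1:Int) else 0)) = canon g n := by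
  induction n with
  | zero => rfl
  | succ n ih =>
    rw [canon, List.range_succ, List.map_append, List.map_append]
    simp only [List.map_cons, List.map_nil]
    rw [runningTotals_append_singleton, ih, canon]
    congr 1
    rw [PySem.List.sum_map_ite_one_zero]
    simp [List.range_succ, List.countP_append]

-- [g(xs[i]) for i in range(len(xs))] = [g(x) for x in xs]
theorem map_range_getD {α β : Type} (xs : List α) (d : α) (g : α → β) :
    (List.range xs.length).map (fun i => g (xs.getD i d)) = xs.map g := by
  apply List.ext_getElem
  · simp
  · intro i h1 h2
    simp [List.getD_eq_getElem?_getD, List.getElem?_eq_getElem (by simpa using h2)]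

-- normalise A's if/else double-write into a single write of (old + indicator)
theorem step_eq (cond : Int → Bool) :
    (fun (ps : List Int) (r : Int) => if cond r then PySem.List.pySetD ps (r+1) (PySem.List.pyGetD ps r 0 + 1)
        else PySem.List.pySetD ps (r+1) (PySem.List.pyGetD ps r 0))
      = fun ps r => PySem.List.pySetD ps (r+1) (PySem.List.pyGetD ps r 0 + (if cond r then 1 else 0)) := by
  funext ps r
  split <;> simp

theorem a_loop_eq (cond : Int → Bool) (n : Nat) :
    (PySem.List.pyRange 0 (n:Int) 1).foldl
      (fun (ps : List Int) (r : Int) => if cond r then PySem.List.pySetD ps (r+1) (PySem.List.pyGetD ps r 0 + 1)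
        else PySem.List.pySetD ps (r+1) (PySem.List.pyGetD ps r 0))
      (List.replicate (n+1) 0)
      = (List.range n).foldl (fun ps r => ps.set (r+1) (ps.getD r 0 + (if cond (r:Int) then 1 else 0))) (List.replicate (n+1) (0:Int)) := by
  rw [step_eq, PySem.List.pyRange_zero_natCast, List.foldl_map]
  congr 1
  funext ps r
  rw [show ((r:Int)+1) = (((r+1:Nat)):Int) by push_cast; ring,
    PySem.List.pySetD_natCast, PySem.List.pyGetD_natCast]

theorem map_range_getD_comp {α β : Type} (xs : List α) (d : α) (g : α → β) :
    (PySem.List.pyRange 0 (xs.length : Int) 1).map (fun i => g (PySem.List.pyGetD xs i d)) = xs.map g := by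
  rw [PySem.List.pyRange_zero_natCast, List.map_map]
  have h : ((fun i => g (PySem.List.pyGetD xs i d)) ∘ fun (k:Nat) => (k:Int)) = fun k => g (xs.getD k d) := by
    funext k; simp [PySem.List.pyGetD_natCast]
  rw [h, map_range_getD]

theorem cols_ind (matrix : List (List String)) (c : Int) :
    ((PySem.List.pyRange 0 (matrix.length:Int) 1).map
        (fun i => PySem.List.pyGetD (PySem.List.pyGetD matrix i []) c "")).all (fun x => x == ".")
      = matrix.all (fun row => PySem.List.pyGetD row c "" == ".") := by
  rw [show (PySem.List.pyRange 0 (matrix.length:Int) 1).map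
        (fun i => PySem.List.pyGetD (PySem.List.pyGetD matrix i []) c "")
      = matrix.map (fun row => PySem.List.pyGetD row c "") from map_range_getD_comp matrix [] (fun row => PySem.List.pyGetD row c "")]
  simp [List.all_map, Function.comp_def]

-- B side: the column sieve equals one filter by "all rows have '.' there"
theorem foldl_filter_all {α β : Type} (rows : List α) (p : α → β → Bool) :
    ∀ init : List β, rows.foldl (fun cand row => cand.filter (p row)) init
      = init.filter (fun c => rows.all (fun row => p row c)) := by
  induction rows with
  | nil => intro init; simp
  | cons r rs ih =>
    intro init
    rw [List.foldl_cons, ih, List.filter_filter]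
    congr 1
    funext c
    simp [Bool.and_comm]

-- the sorted index list of the indices satisfying f
def idxOf (f : Nat → Bool) (n : Nat) : List Int := ((List.range n).filter f).map Int.ofNat

-- the merge-walk guard fires at step k exactly when f k, provided the pointer holds the count so far
theorem guard_iff (f : Nat → Bool) (n k : Nat) (hk : k < n) :
    ((List.range k).countP f < (idxOf f n).length &&
      (idxOf f n).getD ((List.range k).countP f) 0 == (k : Int)) = f k := by
  obtain ⟨m, rfl⟩ : ∃ m, n = (k + 1) + m := ⟨n - (k+1), by omega⟩
  rw [idxOf, List.range_add, List.range_succ,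
    List.filter_append, List.filter_append, List.map_append, List.map_append]
  have hA : (((List.range k).filter f).map Int.ofNat).length = (List.range k).countP f := by
    simp [List.countP_eq_length_filter]
  cases hf : f k with
  | false =>
    have hfil : List.filter f [k] = [] := by simp [hf]
    rw [hfil, List.map_nil, List.append_nil]
    cases hC : ((List.range m).map (fun x => k+1+x)).filter f with
    | nil => simp [hA]
    | cons y ys =>
      have hy : k + 1 ≤ y := by
        have h1 : y ∈ ((List.range m).map (fun x => k+1+x)).filter f := by
          rw [hC]; exact List.mem_cons_self
        have h2 := List.mem_of_mem_filter h1
        simp only [List.mem_map, List.mem_range] at h2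
        omega
      have hyk : ((y:Int) == (k:Int)) = false := by
        simp; exact_mod_cast (by omega : y ≠ k)
      have hg : ((((List.range k).filter f).map Int.ofNat) ++ ((y :: ys).map Int.ofNat)).getD ((List.range k).countP f) 0 = (y:Int) := by
        rw [List.getD_append_right _ _ _ _ (by omega)]
        simp [hA]
      rw [hg, hyk, Bool.and_false]
  | true =>
    have hfil : List.filter f [k] = [k] := by simp [hf]
    rw [hfil, List.append_assoc]
    have hg : ((((List.range k).filter f).map Int.ofNat) ++ (([k].map Int.ofNat) ++ (((List.range m).map (fun x => k+1+x)).filter f).map Int.ofNat)).getD ((List.range k).countP f) 0 = (k:Int) := by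
      rw [List.getD_append_right _ _ _ _ (by omega)]
      simp [hA]
    rw [hg]
    simp [hA]

-- invariant of the merge walk: pointer = count so far, output = running counts
theorem counts_inv (f : Nat → Bool) (n : Nat) : ∀ k, k ≤ n →
    (List.range k).foldl (fun (st : Nat × List Int) (i : Nat) =>
        let j := if st.1 < (idxOf f n).length && (idxOf f n).getD st.1 0 == (i : Int) then st.1 + 1 else st.1
        (j, st.2 ++ [(j : Int)])) ((0 : Nat), ([] : List Int))
      = ((List.range k).countP f, canon f k) := by
  intro k
  induction k with
  | zero => intro _; rfl
  | succ k ih =>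
    intro hk
    rw [List.range_succ, List.foldl_append, ih (by omega), List.foldl_cons, List.foldl_nil]
    simp only [guard_iff f n k (by omega)]
    have hc : (List.range (k+1)).countP f = if f k then (List.range k).countP f + 1 else (List.range k).countP f := by
      rw [List.range_succ, List.countP_append]; split <;> simp_all
    have hcanon : canon f (k+1) = canon f k ++ [(((List.range (k+1)).countP f : Nat) : Int)] := by
      rw [canon, canon, List.range_succ, List.map_append]
      simp [List.range_succ]
    rw [← List.range_succ, hcanon, hc]

theorem countsUpto_idxOf (f : Nat → Bool) (n : Nat) :
    countsUpto (idxOf f n) n = canon f n := by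
  rw [countsUpto, counts_inv f n n le_rfl]

-- list comprehension over range(len) filtering by a predicate = idxOf of that predicate
theorem filter_pyRange_idxOf (n : Nat) (p : Int → Bool) :
    (PySem.List.pyRange 0 (n : Int) 1).filter p = idxOf (fun k => p (k : Int)) n := by
  rw [PySem.List.pyRange_zero_natCast, List.filter_map, idxOf]
  rfl

-- ===== VERDICT =====
theorem find_empty_spaces_spec : Claim_equal_find_empty_spaces := by
  intro matrix _ _
  show find_empty_spaces matrix = find_empty_spaces_alt matrix
  simp only [find_empty_spaces, find_empty_spaces_alt]
  rw [a_loop_eq, a_loop_eq, PySem.List.slice_from _ (by norm_num : (0:Int) ≤ 1),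
    PySem.List.slice_from _ (by norm_num : (0:Int) ≤ 1)]
  simp only [Int.toNat_one, loop_drop, runningTotals_canon, cols_ind]
  rw [foldl_filter_all, filter_pyRange_idxOf, filter_pyRange_idxOf,
    countsUpto_idxOf, countsUpto_idxOf]
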